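-- pv_equiv track=rewrite | github.com/danielchukwu/Master-the-coding-interview | 4. How To Solve Coding Problems/5.exercise_interview_question.py | hasCommonItem
-- ===== SOURCE A (Python) =====
-- def hasCommonItem(arr1, arr2):
--    newArray = arr1 + arr2
--    common = set()
--
--    for item in newArray:
--       if item in common:
--          return True
--       common.add(item)
--
--    return False
-- ===== SOURCE B (Python) =====
-- def hasCommonItem(arr1, arr2):
--     s = sorted(arr1 + arr2)
--     return any(s[i] == s[i + 1] for i in range(len(s) - 1))
-- ===== Notes on version B (the rewrite author's own statement) =====
-- stated objective: alternative
-- what changed: B sorts the concatenated list and scans adjacent pairs for an equal neighbour, replacing A's hash-set membership loop with a comparison-based sort-then-scan algorithm.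
import Mathlib
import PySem

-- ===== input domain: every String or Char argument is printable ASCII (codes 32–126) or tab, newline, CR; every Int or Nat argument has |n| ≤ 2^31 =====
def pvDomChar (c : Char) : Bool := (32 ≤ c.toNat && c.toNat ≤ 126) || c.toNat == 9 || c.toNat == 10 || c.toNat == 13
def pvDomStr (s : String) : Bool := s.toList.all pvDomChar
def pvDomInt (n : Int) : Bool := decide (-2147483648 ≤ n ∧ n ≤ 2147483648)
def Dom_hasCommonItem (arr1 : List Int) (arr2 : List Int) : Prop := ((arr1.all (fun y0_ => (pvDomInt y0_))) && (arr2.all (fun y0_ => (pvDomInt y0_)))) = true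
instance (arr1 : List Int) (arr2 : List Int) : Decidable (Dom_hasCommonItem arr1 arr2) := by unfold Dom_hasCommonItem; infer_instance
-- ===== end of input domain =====

-- B sorts the concatenation and scans adjacent pairs, instead of A's hash-set membership loop; objective: alternative algorithm.

-- ===== PORT A =====
-- the loop 'for item in newArray: if item in common: return True; common.add(item)'
def hasCommonItemLoop : List Int → PySem.Set Int → Bool
  | [], _ => false
  | item :: rest, common =>
      if PySem.Set.contains common item then true
      else hasCommonItemLoop rest (PySem.Set.add common item)

def hasCommonItem (arr1 : List Int) (arr2 : List Int) : Bool :=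
  let newArray := arr1 ++ arr2
  hasCommonItemLoop newArray PySem.Set.empty

-- ===== PORT B =====
-- 'any(s[i] == s[i+1] for i in range(len(s)-1))': scan of adjacent pairs of the sorted list
def adjEq : List Int → Bool
  | a :: b :: rest => a == b || adjEq (b :: rest)
  | _ => false

def hasCommonItem_alt (arr1 : List Int) (arr2 : List Int) : Bool :=
  let s := PySem.List.sorted (arr1 ++ arr2) (fun x => x) false
  adjEq s

-- ===== PRECONDITION & SPEC =====
def Spec_hasCommonItem (arr1 : List Int) (arr2 : List Int) (out : Bool) : Prop := out = hasCommonItem_alt arr1 arr2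
instance (arr1 : List Int) (arr2 : List Int) (out : Bool) : Decidable (Spec_hasCommonItem arr1 arr2 out) := by unfold Spec_hasCommonItem; infer_instance

-- ===== CLAIM (what is proved, stated in full; the proofs are below) =====
def Claim_equal_hasCommonItem : Prop := ∀ (arr1 : List Int) (arr2 : List Int), Dom_hasCommonItem arr1 arr2 → Spec_hasCommonItem arr1 arr2 (hasCommonItem arr1 arr2)

-- ===== LEMMAS AND PROOFS =====

-- A's loop reports true iff the remaining input together with the seen set has a duplicate
theorem loop_nodup (xs : List Int) (s : PySem.Set Int) (hs : List.Nodup s) :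
    hasCommonItemLoop xs s = !decide ((s ++ xs).Nodup) := by
  induction xs generalizing s with
  | nil => simp [hasCommonItemLoop, hs]
  | cons x xs ih =>
      by_cases h : PySem.Set.contains s x = true
      · have hm : x ∈ s := by simpa using h
        have : ¬ (s ++ x :: xs).Nodup := by
          intro hn
          exact (List.disjoint_of_nodup_append hn) hm (List.mem_cons_self)
        rw [hasCommonItemLoop]
        simp only [h, if_true, this, decide_false, Bool.not_false]
      · have hm : x ∉ s := by simpa using h
        have hadd : PySem.Set.add s x = s ++ [x] := by simp [PySem.Set.add, hm]
        have hns : (s ++ [x]).Nodup :=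
          hs.append (List.nodup_singleton x) (List.disjoint_singleton.mpr hm)
        have hperm : (s ++ [x] ++ xs).Perm (s ++ x :: xs) := by
          simpa using List.perm_append_comm_assoc s [x] xs
        rw [hasCommonItemLoop]
        simp only [h, hadd, ih _ hns]
        rw [if_neg (fun hq => Bool.false_ne_true hq)]
        congr 1
        rw [decide_eq_decide]
        exact hperm.nodup_iff

-- adjacent-equal scan on a ≤-sorted list detects exactly non-Nodup
theorem adjEq_eq (t : List Int) (hp : t.Pairwise (· ≤ ·)) :
    adjEq t = !decide t.Nodup := by
  induction t with
  | nil => simp [adjEq]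
  | cons a t ih =>
      cases t with
      | nil => simp [adjEq]
      | cons b r =>
          have hp' : (b :: r).Pairwise (· ≤ ·) := hp.tail
          have hab : a ≤ b := (List.pairwise_cons.mp hp).1 b List.mem_cons_self
          by_cases hEq : a = b
          · subst hEq
            simp [adjEq]
          · have hnotmem : a ∉ b :: r := by
              intro hmem
              rcases List.mem_cons.mp hmem with h | h
              · exact hEq h
              · have hba : b ≤ a := (List.pairwise_cons.mp hp').1 a h
                exact hEq (le_antisymm hab hba)
            rw [adjEq]
            have : (a == b) = false := by simp [hEq]
            rw [this, Bool.false_or, ih hp']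
            simp [List.nodup_cons, hnotmem]

-- ===== VERDICT (by name: the statement is the Claim_ definition above) =====
theorem hasCommonItem_spec : Claim_equal_hasCommonItem := by
  intro arr1 arr2 _
  unfold Spec_hasCommonItem hasCommonItem hasCommonItem_alt
  show hasCommonItemLoop (arr1 ++ arr2) PySem.Set.empty
      = adjEq (PySem.List.sorted (arr1 ++ arr2) (fun x => x) false)
  rw [show (PySem.Set.empty : PySem.Set Int) = [] from rfl]
  rw [loop_nodup _ _ List.nodup_nil, adjEq_eq _ (PySem.List.sorted_pairwise _ _)]
  simp only [List.nil_append]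
  congr 1
  simp [(PySem.List.sorted_perm (arr1 ++ arr2) (fun x => x) false).nodup_iff]
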